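-- pv_equiv track=rewrite | github.com/alchemorphosis/beachdog | modules/analyze.py | countHighScores
-- ===== SOURCE A (Python) =====
-- def countHighScores(scores:dict[str,int]) -> list[int]:
--     scoreCount = [0, 0, 0]
--     for score in scores.values():
--         if score == 60:
--             scoreCount[0] += 1
--         elif score == 70:
--             scoreCount[1] += 1
--         elif score == 80:
--             scoreCount[2] += 1
--     return scoreCount
-- ===== SOURCE B (Python) =====
-- def countHighScores(scores: dict[str, int]) -> list[int]:
--     vals = list(scores.values())
--     return [vals.count(target) for target in (60, 70, 80)]
-- ===== Notes on version B (the rewrite author's own statement) =====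
-- stated objective: simpler
-- what changed: Replaced the single pass with a mutable three-slot accumulator and a per-element if/elif branch by three staged full scans: one list.count pass per target value (60, 70, 80), assembled by a comprehension.
import Mathlib
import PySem

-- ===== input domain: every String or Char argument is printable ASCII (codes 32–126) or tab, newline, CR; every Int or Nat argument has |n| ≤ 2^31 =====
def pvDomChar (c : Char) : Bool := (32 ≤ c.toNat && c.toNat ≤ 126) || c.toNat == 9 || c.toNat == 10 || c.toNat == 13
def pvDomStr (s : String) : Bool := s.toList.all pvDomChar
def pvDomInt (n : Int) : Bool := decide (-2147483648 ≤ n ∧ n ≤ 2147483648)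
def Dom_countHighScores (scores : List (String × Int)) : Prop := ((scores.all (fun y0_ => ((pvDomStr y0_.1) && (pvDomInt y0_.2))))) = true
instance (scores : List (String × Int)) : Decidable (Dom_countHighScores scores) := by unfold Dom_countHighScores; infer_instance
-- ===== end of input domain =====

-- ===== PORT A =====
-- A: single pass, per-value if/elif branch updating a mutable triple (literal transliteration).
def countHighScores (scores : List (String × Int)) : List Int :=
  let sc := (scores.map Prod.snd).foldl
    (fun (t : Int × Int × Int) score =>
      if score = 60 then (t.1 + 1, t.2.1, t.2.2)
      else if score = 70 then (t.1, t.2.1 + 1, t.2.2)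
      else if score = 80 then (t.1, t.2.1, t.2.2 + 1)
      else t)
    (0, 0, 0)
  [sc.1, sc.2.1, sc.2.2]

-- ===== PORT B =====
-- B: three staged full scans, one list.count per target, assembled by a comprehension.
def countHighScores_alt (scores : List (String × Int)) : List Int :=
  let vals := scores.map Prod.snd
  [(60 : Int), 70, 80].map (fun target => (PySem.List.count vals target : Int))

-- ===== PRECONDITION & SPEC =====
def Spec_countHighScores (scores : List (String × Int)) (out : List Int) : Prop := out = countHighScores_alt scores
instance (scores : List (String × Int)) (out : List Int) : Decidable (Spec_countHighScores scores out) := by unfold Spec_countHighScores; infer_instance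

-- ===== CLAIM (what is proved, stated in full; the proofs are below) =====
def Claim_equal_countHighScores : Prop := ∀ (scores : List (String × Int)), Dom_countHighScores scores → Spec_countHighScores scores (countHighScores scores)

-- ===== LEMMAS AND PROOFS =====

-- ===== VERDICT (by name: the statement is the Claim_ definition above) =====
lemma foldA_counts (xs : List Int) (a b c : Int) :
    xs.foldl
      (fun (t : Int × Int × Int) score =>
        if score = 60 then (t.1 + 1, t.2.1, t.2.2)
        else if score = 70 then (t.1, t.2.1 + 1, t.2.2)
        else if score = 80 then (t.1, t.2.1, t.2.2 + 1)
        else t)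
      (a, b, c)
    = (a + xs.count 60, b + xs.count 70, c + xs.count 80) := by
  induction xs generalizing a b c with
  | nil => simp
  | cons x xs ih =>
    by_cases h60 : x = 60 <;> by_cases h70 : x = 70 <;> by_cases h80 : x = 80 <;>
      simp [List.foldl, ih, h60, h70, h80] <;> ring

theorem countHighScores_spec : Claim_equal_countHighScores := by
  intro scores _
  unfold Spec_countHighScores countHighScores countHighScores_alt
  simp [foldA_counts, PySem.List.count_eq]
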